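-- pv_equiv track=rewrite | github.com/sandhiyabk/Patient_tracker_system | agents/alert_agent.py | _determine_escalation
-- ===== SOURCE A (Python) =====
-- from typing import Dict, List, Optional, Tuple
--
-- def _determine_escalation(alerts: List[Dict]) -> Dict:
--     """Determine escalation path based on alerts"""
--     critical_count = sum(1 for a in alerts if a["severity"] == "CRITICAL")
--
--     if critical_count > 0:
--         return {
--             "level": "IMMEDIATE",
--             "contact": "Attending Physician / Rapid Response Team",
--             "path": "Direct phone call + documentation"
--         }
--
--     high_count = sum(1 for a in alerts if a["severity"] == "HIGH")
--     if high_count > 0: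
--         return {
--             "level": "URGENT",
--             "contact": "Primary Oncology Team",
--             "path": "Page + verbal communication within 4 hours"
--         }
--
--     return {
--         "level": "ROUTINE",
--         "contact": "Nursing team",
--         "path": "Document in chart for next rounds"
--     }
-- ===== SOURCE B (Python) =====
-- def _determine_escalation(alerts):
--     """Determine escalation path based on alerts"""
--     prio = {"CRITICAL": 2, "HIGH": 1}
--     table = {
--         2: {
--             "level": "IMMEDIATE",
--             "contact": "Attending Physician / Rapid Response Team",
--             "path": "Direct phone call + documentation"
--         },
--         1: {
--             "level": "URGENT",
--             "contact": "Primary Oncology Team",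
--             "path": "Page + verbal communication within 4 hours"
--         },
--         0: {
--             "level": "ROUTINE",
--             "contact": "Nursing team",
--             "path": "Document in chart for next rounds"
--         },
--     }
--     rank = max((prio.get(a["severity"], 0) for a in alerts), default=0)
--     return table[rank]
-- ===== Notes on version B (the rewrite author's own statement) =====
-- stated objective: simpler
-- what changed: Replaces A's two sequential count-scans and branch chain with a single pass computing the maximum severity rank, then one table lookup.
import Mathlib
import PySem

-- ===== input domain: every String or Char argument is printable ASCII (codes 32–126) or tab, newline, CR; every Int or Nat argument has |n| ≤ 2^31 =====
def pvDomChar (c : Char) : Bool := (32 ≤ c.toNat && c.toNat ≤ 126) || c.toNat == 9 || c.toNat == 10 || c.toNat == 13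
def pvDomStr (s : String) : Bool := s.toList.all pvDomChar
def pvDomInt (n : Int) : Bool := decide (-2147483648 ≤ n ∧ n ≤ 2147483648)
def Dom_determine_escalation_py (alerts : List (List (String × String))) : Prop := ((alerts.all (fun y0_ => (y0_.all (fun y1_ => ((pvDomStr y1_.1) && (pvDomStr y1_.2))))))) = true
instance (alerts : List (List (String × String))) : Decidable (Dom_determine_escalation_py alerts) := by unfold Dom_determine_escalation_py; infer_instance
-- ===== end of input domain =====

-- One honest line: B replaces A's two count-scans and branch chain by one max-of-ranks pass and a table lookup (simpler decomposition, same cost).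

-- ===== PORT A =====
-- a["severity"]: under Pre_ the key is present, so the .getD "" default is never used (Python raises KeyError outside Pre_).
def pvSev (a : List (String × String)) : String := (a.lookup "severity").getD ""

def pvImmediate : List (String × String) :=
  [("level", "IMMEDIATE"), ("contact", "Attending Physician / Rapid Response Team"), ("path", "Direct phone call + documentation")]
def pvUrgent : List (String × String) :=
  [("level", "URGENT"), ("contact", "Primary Oncology Team"), ("path", "Page + verbal communication within 4 hours")]
def pvRoutine : List (String × String) :=
  [("level", "ROUTINE"), ("contact", "Nursing team"), ("path", "Document in chart for next rounds")]

def determine_escalation_py (alerts : List (List (String × String))) : List (String × String) :=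
  let critical_count := alerts.countP (fun a => pvSev a == "CRITICAL")
  if critical_count > 0 then pvImmediate
  else
    let high_count := alerts.countP (fun a => pvSev a == "HIGH")
    if high_count > 0 then pvUrgent
    else pvRoutine

-- ===== PORT B =====
-- prio.get(a["severity"], 0)
def pvPrio (s : String) : Nat := if s == "CRITICAL" then 2 else if s == "HIGH" then 1 else 0

def determine_escalation_py_alt (alerts : List (List (String × String))) : List (String × String) :=
  let rank := alerts.foldl (fun r a => max r (pvPrio (pvSev a))) 0
  if rank == 2 then pvImmediate else if rank == 1 then pvUrgent else pvRoutine

-- ===== PRECONDITION & SPEC =====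
-- Pre_: every alert dict has a "severity" key; on others Python A raises KeyError (no value is returned).
def Pre_determine_escalation_py (alerts : List (List (String × String))) : Prop :=
  (alerts.all (fun a => (a.lookup "severity").isSome)) = true
instance (alerts : List (List (String × String))) : Decidable (Pre_determine_escalation_py alerts) := by unfold Pre_determine_escalation_py; infer_instance
def pvWitness_determine_escalation_py : (List (List (String × String))) := [[("severity", "HIGH")], [("severity", "LOW")]]

def Spec_determine_escalation_py (alerts : List (List (String × String))) (out : List (String × String)) : Prop := out = determine_escalation_py_alt alerts
instance (alerts : List (List (String × String))) (out : List (String × String)) : Decidable (Spec_determine_escalation_py alerts out) := by unfold Spec_determine_escalation_py; infer_instance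

-- ===== CLAIM (what is proved, stated in full; the proofs are below) =====
def Claim_equal_determine_escalation_py : Prop := ∀ (alerts : List (List (String × String))), Dom_determine_escalation_py alerts → Pre_determine_escalation_py alerts → Spec_determine_escalation_py alerts (determine_escalation_py alerts)

-- ===== LEMMAS AND PROOFS =====

lemma pv_foldl_max (f : List (String × String) → Nat) (l : List (List (String × String))) (c : Nat) :
    l.foldl (fun r a => max r (f a)) c = max c (l.foldl (fun r a => max r (f a)) 0) := by
  induction l generalizing c with
  | nil => simp
  | cons a l ih =>
    simp only [List.foldl_cons]
    rw [ih (max c (f a)), ih (max 0 (f a))]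
    omega

lemma pv_rank_char (l : List (List (String × String))) :
    l.foldl (fun r a => max r (pvPrio (pvSev a))) 0 =
      (if l.countP (fun a => pvSev a == "CRITICAL") > 0 then 2
       else if l.countP (fun a => pvSev a == "HIGH") > 0 then 1 else 0) := by
  induction l with
  | nil => simp
  | cons a l ih =>
    simp only [List.foldl_cons, List.countP_cons]
    rw [pv_foldl_max (fun a => pvPrio (pvSev a)) l (max 0 (pvPrio (pvSev a))), ih]
    by_cases hc : pvSev a == "CRITICAL"
    · simp [pvPrio, hc]; split_ifs <;> omega
    · by_cases hh : pvSev a == "HIGH"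
      · simp [pvPrio, hc, hh]; split_ifs <;> omega
      · simp [pvPrio, hc, hh]

-- ===== VERDICT (by name: the statement is the Claim_ definition above) =====
theorem determine_escalation_py_spec : Claim_equal_determine_escalation_py := by
  intro alerts _ _
  show determine_escalation_py alerts = determine_escalation_py_alt alerts
  unfold determine_escalation_py determine_escalation_py_alt
  rw [pv_rank_char]
  by_cases h1 : alerts.countP (fun a => pvSev a == "CRITICAL") > 0
  · simp [h1]
  · by_cases h2 : alerts.countP (fun a => pvSev a == "HIGH") > 0
    · simp [h1, h2]
    · simp [h1, h2]
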